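-- pv_equiv track=rewrite | github.com/k-cybulski/sigman-project | macros/Estimate time decay/start.py | removeMaxTau
-- ===== SOURCE A (Python) =====
-- def removeMaxTau(TauByFit, max):
--     for i in range (0,len(TauByFit)):
--         if (TauByFit[i]>(max-1)):
--             j = i
--             while (TauByFit[j]>(max-1)):
--                 j = j+1
--                 if (j == len(TauByFit)):
--                     j = j-1
--                     break
--             TauByFit[i] = TauByFit[j]
--     return TauByFit
-- ===== SOURCE B (Python) =====
-- # One backward pass: track the replacement value ("next in-range value, else the
-- # original last element"), then write the result back in place (same mutation as A).
-- def removeMaxTau(TauByFit, max):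
--     if not TauByFit:
--         return TauByFit
--     fill = TauByFit[-1]
--     out = []
--     for v in reversed(TauByFit):
--         if v <= max - 1:
--             fill = v
--         out.append(fill)
--     out.reverse()
--     TauByFit[:] = out
--     return TauByFit
-- ===== Notes on version B (the rewrite author's own statement) =====
-- stated objective: alternative
-- what changed: Replaced the per-element forward scan for the next in-range value by a single backward pass that carries the current replacement value (next in-range element, else the original last element).
import Mathlib
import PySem

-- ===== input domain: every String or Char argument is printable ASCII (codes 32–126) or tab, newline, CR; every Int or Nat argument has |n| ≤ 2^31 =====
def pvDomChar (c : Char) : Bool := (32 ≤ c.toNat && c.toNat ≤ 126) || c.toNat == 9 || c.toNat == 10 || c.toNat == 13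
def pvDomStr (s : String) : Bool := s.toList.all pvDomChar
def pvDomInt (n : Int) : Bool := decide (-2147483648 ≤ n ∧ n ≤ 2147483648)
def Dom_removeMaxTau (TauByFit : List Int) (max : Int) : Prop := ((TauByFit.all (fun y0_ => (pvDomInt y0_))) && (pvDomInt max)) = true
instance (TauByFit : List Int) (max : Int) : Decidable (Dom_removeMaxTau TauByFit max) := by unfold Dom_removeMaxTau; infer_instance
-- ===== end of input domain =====

-- B replaces A's per-element forward scan by one backward pass carrying the replacement
-- value. A mutates its argument in place; the Python B performs the same in-place update;
-- the equivalence proved here is about the return value.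

-- ===== PORT A =====
-- inner while loop of A: advance j while TauByFit[j] > max-1; on hitting the end, j = len-1.
-- (indices are always in range when read, so getD is exact for Python's TauByFit[j])
def whileJAux (l : List Int) (max : Int) : Nat → Nat → Nat
  | 0, j => j                                -- fuel exhausted (never reached from whileJ)
  | fuel + 1, j =>
    if l.getD j 0 > max - 1 then
      if j + 1 = l.length then l.length - 1
      else whileJAux l max fuel (j + 1)
    else j

def whileJ (l : List Int) (max : Int) (j : Nat) : Nat :=
  whileJAux l max (l.length - j) j

-- the for-loop over i in range(0, len(TauByFit)), with the in-place assignment as List.set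
-- runs exactly len(TauByFit) iterations, i = 0,1,…: structural recursion on the iteration count
def aloop (max : Int) : Nat → List Int → Nat → List Int
  | 0, l, _ => l
  | fuel + 1, l, i =>
    if l.getD i 0 > max - 1 then
      aloop max fuel (l.set i (l.getD (whileJ l max i) 0)) (i + 1)
    else aloop max fuel l (i + 1)

def removeMaxTau (TauByFit : List Int) (max : Int) : List Int :=
  aloop max TauByFit.length TauByFit 0

-- ===== PORT B =====
-- single backward pass (Python's `for v in reversed(...)` with accumulator = foldr):
-- state = (current fill value, output built front-first); fill starts at the last element
def removeMaxTau_alt (TauByFit : List Int) (max : Int) : List Int :=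
  if TauByFit.isEmpty then TauByFit
  else
    (TauByFit.foldr
      (fun v st => ((if v ≤ max - 1 then v else st.1),
                    (if v ≤ max - 1 then v else st.1) :: st.2))
      (TauByFit.getLastD 0, ([] : List Int))).2

-- ===== PRECONDITION & SPEC =====
def Spec_removeMaxTau (TauByFit : List Int) (max : Int) (out : List Int) : Prop := out = removeMaxTau_alt TauByFit max
instance (TauByFit : List Int) (max : Int) (out : List Int) : Decidable (Spec_removeMaxTau TauByFit max out) := by unfold Spec_removeMaxTau; infer_instance

-- ===== CLAIM (what is proved, stated in full; the proofs are below) =====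
def Claim_equal_removeMaxTau : Prop := ∀ (TauByFit : List Int) (max : Int), Dom_removeMaxTau TauByFit max → Spec_removeMaxTau TauByFit max (removeMaxTau TauByFit max)

-- ===== LEMMAS AND PROOFS =====

lemma getLast?_cons_ne (v : Int) (r : List Int) (hr : r ≠ []) :
    (v :: r).getLast? = r.getLast? := by
  cases r with
  | nil => exact absurd rfl hr
  | cons a t => simp

lemma getLastD_cons_ne (v : Int) (r : List Int) (hr : r ≠ []) :
    (v :: r).getLastD 0 = r.getLastD 0 := by
  rw [List.getLastD_eq_getLast?, List.getLastD_eq_getLast?, getLast?_cons_ne _ _ hr]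

-- reference: the first element ≤ max-1, else the default d
def fillFrom (max d : Int) : List Int → Int
  | [] => d
  | v :: r => if v ≤ max - 1 then v else fillFrom max d r

-- reference result: each position replaced by fillFrom of its suffix
def refR (max d : Int) : List Int → List Int
  | [] => []
  | v :: r => (if v ≤ max - 1 then v else fillFrom max d r) :: refR max d r

lemma foldr_eq_ref (max d : Int) (l : List Int) :
    l.foldr (fun v st => ((if v ≤ max - 1 then v else st.1),
                          (if v ≤ max - 1 then v else st.1) :: st.2))
      (d, ([] : List Int)) = (fillFrom max d l, refR max d l) := by
  induction l with
  | nil => simp [fillFrom, refR]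
  | cons v r ih =>
    rw [List.foldr_cons, ih]
    by_cases h : v ≤ max - 1 <;> simp [fillFrom, refR, h]

lemma alt_eq_ref (max : Int) (l : List Int) :
    removeMaxTau_alt l max = refR max (l.getLastD 0) l := by
  cases l with
  | nil => simp [removeMaxTau_alt, refR]
  | cons a t =>
    rw [removeMaxTau_alt, if_neg (by simp), foldr_eq_ref]

lemma getD_append_self (pre suf : List Int) (hsuf : suf ≠ []) :
    (pre ++ suf).getD pre.length 0 = suf.headD 0 := by
  cases suf with
  | nil => exact absurd rfl hsuf
  | cons v r => simp [List.getD]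

lemma whileJ_val (max : Int) :
    ∀ (suf pre : List Int), suf ≠ [] →
      (pre ++ suf).getD (whileJ (pre ++ suf) max pre.length) 0
        = fillFrom max (suf.getLastD 0) suf := by
  intro suf
  induction suf with
  | nil => intro pre h; exact absurd rfl h
  | cons v r ih =>
    intro pre _
    have hlen : pre.length < (pre ++ v :: r).length := by simp
    have hget : (pre ++ v :: r).getD pre.length 0 = v := by
      exact getD_append_self pre (v :: r) (List.cons_ne_nil v r)
    have hfuel : (pre ++ v :: r).length - pre.length = r.length + 1 := by simp
    rw [whileJ, hfuel, whileJAux, hget]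
    by_cases hv : v > max - 1
    · rw [if_pos hv]
      by_cases hr : r = []
      · subst hr
        rw [if_pos (by simp : pre.length + 1 = (pre ++ [v]).length)]
        have h1 : (pre ++ [v]).length - 1 = pre.length := by simp
        rw [h1, hget]
        simp [fillFrom, not_le.mpr hv]
      · have hne : ¬ pre.length + 1 = (pre ++ v :: r).length := by simp; omega
        rw [if_neg hne]
        have h1 : pre ++ v :: r = (pre ++ [v]) ++ r := by simp
        have h2 : pre.length + 1 = (pre ++ [v]).length := by simp
        have h3 : r.length = ((pre ++ [v]) ++ r).length - (pre ++ [v]).length := by simp; omega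
        rw [h1, h2, h3, ← whileJ, ih (pre ++ [v]) hr, getLastD_cons_ne _ _ hr]
        simp [fillFrom, not_le.mpr hv]
    · rw [if_neg hv]
      rw [hget]
      simp [fillFrom, le_of_not_gt hv]

lemma aloop_spec (max : Int) :
    ∀ (suf pre : List Int),
      aloop max suf.length (pre ++ suf) pre.length = pre ++ refR max (suf.getLastD 0) suf := by
  intro suf
  induction suf with
  | nil => intro pre; simp [aloop, refR]
  | cons v r ih =>
    intro pre
    have hget : (pre ++ v :: r).getD pre.length 0 = v := by
      exact getD_append_self pre (v :: r) (List.cons_ne_nil v r)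
    rw [List.length_cons, aloop, hget]
    by_cases hv : v > max - 1
    · rw [if_pos hv]
      rw [whileJ_val max (v :: r) pre (by simp)]
      have hset : (pre ++ v :: r).set pre.length (fillFrom max ((v :: r).getLastD 0) (v :: r))
          = (pre ++ [fillFrom max ((v :: r).getLastD 0) (v :: r)]) ++ r := by
        rw [List.set_append_right _ _ (Nat.le_refl pre.length)]
        simp
      rw [hset]
      have h2 : pre.length + 1 = (pre ++ [fillFrom max ((v :: r).getLastD 0) (v :: r)]).length := by
        simp
      rw [h2, ih]
      by_cases hr : r = []
      · subst hr; simp [refR, fillFrom, not_le.mpr hv]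
      · rw [getLastD_cons_ne _ _ hr]
        simp [refR, fillFrom, not_le.mpr hv]
    · rw [if_neg hv]
      have h1 : pre ++ v :: r = (pre ++ [v]) ++ r := by simp
      have h2 : pre.length + 1 = (pre ++ [v]).length := by simp
      rw [h1, h2, ih]
      by_cases hr : r = []
      · subst hr; simp [refR, le_of_not_gt hv]
      · rw [getLastD_cons_ne _ _ hr]
        simp [refR, le_of_not_gt hv]

-- ===== VERDICT (by name: the statement is the Claim_ definition above) =====
theorem removeMaxTau_spec : Claim_equal_removeMaxTau := by
  intro l max _
  show removeMaxTau l max = removeMaxTau_alt l max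
  rw [removeMaxTau, alt_eq_ref]
  simpa using aloop_spec max l []
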